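-- pv_equiv track=rewrite | github.com/kseob758/algorithms | Programmers/lv1/92334 신고 결과 받기/신고 결과 받기.py | solution
-- ===== SOURCE A (Python) =====
-- def solution(id_list, report, k):
--     result_cnt = {} # 각 id별 받은 결과 메일 수를 담는 딕셔너리
--     report_cnt = {} # 각 id별 신고 당한 횟수를 담는 딕셔너리
--     report_list = {} # 각 id별 누가 신고했는지 담는 딕셔너리
--     banned = [] # ban 당한 id를 담는 리스트
--
--
--     for id in id_list: # 각 dictionary 초기화
--         result_cnt[id] = 0
--         report_cnt[id] = 0
--         report_list[id] = []
--
--     report = set(report) # 한 유저가 같은 유저를 여러 번 신고는 불가능 -> 중복 제거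
--
--     for r in report: # 신고 내용
--         r1, r2 = r.split() # r1 신고한 유저, r2 신고 당한 유저
--         report_list[r2].append(r1) # r2가 r1에게 신고 당했다는 의미
--         report_cnt[r2] += 1 # r2가 신고당한 횟수 +1
--         if report_cnt[r2] == k: # k번 신고 당하면 banned list에 추가
--             banned.append(r2)
--
--     for ban in banned: # banned list에 있는 유저
--         for i in report_list[ban]: # 그 유저를 신고한 유저들
--             result_cnt[i] += 1 # 결과 메일 받은 횟수 +1
--
--     answer = list(result_cnt.values()) # 횟수(dictionary의 value)만 리스트로 변환
--
--     return answer
-- ===== SOURCE B (Python) =====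
-- def solution(id_list, report, k):
--     # Parse the distinct report strings once into (reporter, reported) pairs.
--     pairs = [tuple(r.split()) for r in set(report)]
--     cnt = {}       # reported user -> number of reports against them
--     outgoing = {}  # reporter -> list of users they reported
--     for a, b in pairs:
--         cnt[b] = cnt.get(b, 0) + 1
--         outgoing[a] = outgoing.get(a, []) + [b]
--     banned = {u for u, c in cnt.items() if c >= k}
--     return [sum(t in banned for t in outgoing.get(i, [])) for i in dict.fromkeys(id_list)]
-- ===== Notes on version B (the rewrite author's own statement) =====
-- stated objective: simpler
-- what changed: B replaces A's reported->reporters map plus incremental ban detection and a scatter loop over banned users by a forward reporter->reported map and a final-count ban set (count >= k), producing the answer in one gather pass over the deduplicated id_list counting banned targets per reporter.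
-- outside the precondition, e.g. on solution(['a', 'b'], ['a b'], 0): A returns [0, 0], B returns [1, 0]; on solution(['a', 'b'], ['c b'], 2): A returns [0, 0], B returns [0, 0]
import Mathlib
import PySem

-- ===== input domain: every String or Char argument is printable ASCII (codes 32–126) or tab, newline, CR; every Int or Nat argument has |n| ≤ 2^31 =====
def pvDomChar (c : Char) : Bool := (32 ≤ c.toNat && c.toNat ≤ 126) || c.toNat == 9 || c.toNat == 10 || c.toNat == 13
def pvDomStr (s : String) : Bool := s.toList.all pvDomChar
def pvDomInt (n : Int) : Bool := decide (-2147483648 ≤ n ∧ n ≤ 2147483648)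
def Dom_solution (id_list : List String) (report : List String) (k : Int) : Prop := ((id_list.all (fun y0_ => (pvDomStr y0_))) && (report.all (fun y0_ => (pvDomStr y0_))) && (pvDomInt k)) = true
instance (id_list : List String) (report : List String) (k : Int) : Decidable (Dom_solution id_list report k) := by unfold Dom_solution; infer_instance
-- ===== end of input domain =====

-- B restructures A: instead of a reported->reporters map, incremental ban detection and a
-- scatter loop over banned users, B builds a forward reporter->reported map, takes
-- banned = {u : final count >= k}, and gathers the answer in one pass over the distinct ids.
-- Objective: simpler (same asymptotic cost).

-- ===== PORT A =====
-- step of 'for r in report: ...' — state (report_list, report_cnt, banned);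
-- 'r1, r2 = r.split()' raises ValueError unless exactly two fields (outside Pre_): no-op here
def pvAStep (k : Int)
    (st : PySem.Dict String (List String) × PySem.Dict String Int × List String)
    (r : String) :
    PySem.Dict String (List String) × PySem.Dict String Int × List String :=
  match PySem.Str.split₀ r with
  | [r1, r2] =>
      let rl := st.1.modify r2 [] (· ++ [r1])      -- report_list[r2].append(r1)
      let rc := st.2.1.modify r2 0 (· + 1)         -- report_cnt[r2] += 1
      let banned := if rc.getD r2 0 == k then st.2.2 ++ [r2] else st.2.2
      (rl, rc, banned)
  | _ => st

def solution (id_list : List String) (report : List String) (k : Int) : List Int :=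
  let resultCnt : PySem.Dict String Int :=
    id_list.foldl (fun d id => d.insert id 0) PySem.Dict.empty
  let reportCnt : PySem.Dict String Int :=
    id_list.foldl (fun d id => d.insert id 0) PySem.Dict.empty
  let reportList : PySem.Dict String (List String) :=
    id_list.foldl (fun d id => d.insert id ([] : List String)) PySem.Dict.empty
  let rep : PySem.Set String := PySem.Set.ofList report     -- report = set(report)
  let st := rep.foldl (pvAStep k) (reportList, reportCnt, [])
  -- for ban in banned: for i in report_list[ban]: result_cnt[i] += 1
  let resultCnt := st.2.2.foldl (fun d ban =>
      (st.1.getD ban []).foldl (fun d i => d.modify i 0 (· + 1)) d) resultCnt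
  resultCnt.values

-- ===== PORT B =====
-- r.split() destructured into a pair; a string without exactly two fields raises in Python
-- (outside Pre_): dropped here
def pvParse? (r : String) : Option (String × String) :=
  match PySem.Str.split₀ r with
  | [a, b] => some (a, b)
  | _ => none

def solution_alt (id_list : List String) (report : List String) (k : Int) : List Int :=
  let pairs : List (String × String) := (PySem.Set.ofList report).filterMap pvParse?
  let st := pairs.foldl
    (fun (st : PySem.Dict String Int × PySem.Dict String (List String)) p =>
      (st.1.modify p.2 0 (· + 1),                  -- cnt[b] = cnt.get(b, 0) + 1
       st.2.modify p.1 [] (· ++ [p.2])))           -- outgoing[a] = outgoing.get(a, []) + [b]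
    (PySem.Dict.empty, PySem.Dict.empty)
  let banned : PySem.Set String :=
    PySem.Set.ofList ((st.1.items).filterMap (fun q => if k ≤ q.2 then some q.1 else none))
  (PySem.List.dedup id_list).map (fun i =>
    -- sum(t in banned for t in outgoing.get(i, [])) : a 0/1 sum is a count
    (((st.2.getD i []).countP (fun t => banned.contains t) : Nat) : Int))

-- ===== PRECONDITION & SPEC =====
-- Pre_ restricts to the problem's natural domain (it excludes some inputs A returns on):
-- k ≥ 1 (a nonpositive ban threshold is meaningless; A then bans nobody while B bans every
-- reported user) and every report entry is "reporter reported" with both names in id_list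
-- (otherwise A raises ValueError/KeyError, except when an unknown reporter's target stays
-- below the threshold — there A happens to return and B returns the same value).
def Pre_solution (id_list : List String) (report : List String) (k : Int) : Prop :=
  1 ≤ k ∧ ∀ r ∈ report, (PySem.Str.split₀ r).length = 2 ∧
    ∀ x ∈ PySem.Str.split₀ r, x ∈ id_list
instance (id_list : List String) (report : List String) (k : Int) : Decidable (Pre_solution id_list report k) := by unfold Pre_solution; infer_instance

def pvWitness_solution : List String × List String × Int :=
  (["muzi", "frodo", "apeach"], ["muzi frodo", "apeach frodo"], 2)

def Spec_solution (id_list : List String) (report : List String) (k : Int) (out : List Int) : Prop := out = solution_alt id_list report k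
instance (id_list : List String) (report : List String) (k : Int) (out : List Int) : Decidable (Spec_solution id_list report k out) := by unfold Spec_solution; infer_instance

-- ===== CLAIM (what is proved, stated in full; the proofs are below) =====
def Claim_equal_solution : Prop := ∀ (id_list : List String) (report : List String) (k : Int), Dom_solution id_list report k → Pre_solution id_list report k → Spec_solution id_list report k (solution id_list report k)

-- ===== LEMMAS AND PROOFS =====

-- The parsed (reporter, reported) pairs of the distinct report strings
def pvPairs (report : List String) : List (String × String) :=
  (PySem.Set.ofList report).filterMap pvParse?

-- clean per-component steps of A's loop over set(report)
def pvRlF (d : PySem.Dict String (List String)) (p : String × String) :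
    PySem.Dict String (List String) := d.modify p.2 [] (· ++ [p.1])

def pvPairF (k : Int) (s : PySem.Dict String Int × List String) (p : String × String) :
    PySem.Dict String Int × List String :=
  let rc := s.1.modify p.2 0 (· + 1)
  (rc, if rc.getD p.2 0 == k then s.2 ++ [p.2] else s.2)

lemma pvLen2 {r : String} (h : (PySem.Str.split₀ r).length = 2) :
    ∃ a b, PySem.Str.split₀ r = [a, b] := by
  rcases List.length_eq_two.mp h with ⟨a, b, hab⟩; exact ⟨a, b, hab⟩

-- A's fold over set(report) splits into independent component folds over the parsed pairs
lemma pvFoldA_decomp (k : Int) :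
    ∀ (l : List String)
      (st : PySem.Dict String (List String) × PySem.Dict String Int × List String),
      (∀ r ∈ l, (PySem.Str.split₀ r).length = 2) →
      l.foldl (pvAStep k) st =
        ((l.filterMap pvParse?).foldl pvRlF st.1,
         (l.filterMap pvParse?).foldl (pvPairF k) st.2) := by
  intro l
  induction l with
  | nil => intro st _; rfl
  | cons r l ih =>
      intro st h
      obtain ⟨a, b, hab⟩ := pvLen2 (h r (by simp))
      have hstep : pvAStep k st r = (pvRlF st.1 (a, b), pvPairF k st.2 (a, b)) := by
        simp [pvAStep, hab, pvRlF, pvPairF]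
      have hp : pvParse? r = some (a, b) := by simp [pvParse?, hab]
      simp only [List.foldl_cons, List.filterMap_cons, hp, hstep]
      exact ih _ (fun r hr => h r (by simp [hr]))

-- B's fold splits into its two component folds
lemma pvFoldB_decomp (l : List (String × String))
    (st : PySem.Dict String Int × PySem.Dict String (List String)) :
    l.foldl (fun (st : PySem.Dict String Int × PySem.Dict String (List String)) p =>
        (st.1.modify p.2 0 (· + 1), st.2.modify p.1 [] (· ++ [p.2]))) st =
      (l.foldl (fun d (p : String × String) => d.modify p.2 0 (· + 1)) st.1,
       l.foldl (fun d (p : String × String) => d.modify p.1 [] (· ++ [p.2])) st.2) := by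
  induction l generalizing st with
  | nil => rfl
  | cons p l ih => simp only [List.foldl_cons, ih]

-- report counts: getD of the count-fold component is the count of targets
lemma pvRcCount (l : List (String × String)) (d : PySem.Dict String Int) (b : String) :
    (l.foldl (fun d (p : String × String) => d.modify p.2 0 (· + 1)) d).getD b 0 =
      d.getD b 0 + ((l.map (·.2)).count b : Int) := by
  induction l generalizing d with
  | nil => simp
  | cons p l ih =>
      simp only [List.foldl_cons, List.map_cons, ih, PySem.Dict.getD_modify, List.count_cons]
      by_cases hb : b = p.2
      · simp [hb]
        ring
      · simp [hb, show p.2 ≠ b from fun h => hb h.symm]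

-- reporter lists: getD of the append-fold keyed by the SECOND component
lemma pvRlGetD (l : List (String × String)) (d : PySem.Dict String (List String)) (b : String) :
    (l.foldl pvRlF d).getD b [] =
      d.getD b [] ++ ((l.filter (fun p => p.2 == b)).map (·.1)) := by
  induction l generalizing d with
  | nil => simp
  | cons p l ih =>
      simp only [List.foldl_cons, pvRlF, ih, PySem.Dict.getD_modify, List.filter_cons]
      by_cases hb : b = p.2 <;> (simp [hb, beq_iff_eq]; try simp [eq_comm, hb])

-- banned-list invariant of A's loop: membership ↔ running count ≥ k, and no duplicates
lemma pvBannedInv (k : Int) :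
    ∀ (l : List (String × String)) (rc : PySem.Dict String Int) (bn : List String),
      (∀ b, b ∈ bn ↔ k ≤ rc.getD b 0) → bn.Nodup → (∀ b, 0 ≤ rc.getD b 0) →
      (∀ b, b ∈ (l.foldl (pvPairF k) (rc, bn)).2 ↔
          k ≤ rc.getD b 0 + ((l.map (·.2)).count b : Int)) ∧
        (l.foldl (pvPairF k) (rc, bn)).2.Nodup := by
  intro l
  induction l with
  | nil => intro rc bn hmem hnd _; simpa using ⟨hmem, hnd⟩
  | cons p l ih =>
      intro rc bn hmem hnd hnn
      have hrc' : ∀ b, (rc.modify p.2 0 (· + 1)).getD b 0 =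
          if b = p.2 then rc.getD p.2 0 + 1 else rc.getD b 0 := by
        intro b; rw [PySem.Dict.getD_modify]
      have hstep : pvPairF k (rc, bn) p =
          (rc.modify p.2 0 (· + 1),
           if (rc.getD p.2 0 + 1) == k then bn ++ [p.2] else bn) := by
        simp [pvPairF, hrc' p.2]
      have hnn' : ∀ b, 0 ≤ (rc.modify p.2 0 (· + 1)).getD b 0 := by
        intro b; rw [hrc']; split
        · have := hnn p.2; omega
        · exact hnn b
      have hmem' : ∀ b, b ∈ (if (rc.getD p.2 0 + 1) == k then bn ++ [p.2] else bn) ↔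
          k ≤ (rc.modify p.2 0 (· + 1)).getD b 0 := by
        intro b
        rw [hrc' b]
        by_cases hb : b = p.2
        · subst hb
          rw [if_pos rfl]
          by_cases hk1 : rc.getD p.2 0 + 1 = k
          · rw [if_pos (by simpa using hk1)]
            simp
            omega
          · rw [if_neg (by simpa using hk1)]
            rw [hmem p.2]
            omega
        · rw [if_neg hb]
          by_cases hk1 : rc.getD p.2 0 + 1 = k
          · rw [if_pos (by simpa using hk1)]
            simp [hb, hmem b]
          · rw [if_neg (by simpa using hk1)]
            exact hmem b
      have hnd' : (if (rc.getD p.2 0 + 1) == k then bn ++ [p.2] else bn).Nodup := by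
        split_ifs with hk1
        · simp only [beq_iff_eq] at hk1
          have hnotin : p.2 ∉ bn := by rw [hmem p.2]; omega
          refine List.Nodup.append hnd (List.nodup_singleton _) ?_
          intro a ha hb2
          rw [List.mem_singleton] at hb2
          exact hnotin (hb2 ▸ ha)
        · exact hnd
      simp only [List.foldl_cons, hstep]
      obtain ⟨H1, H2⟩ := ih _ _ hmem' hnd' hnn'
      refine ⟨fun b => ?_, H2⟩
      rw [H1 b, hrc' b]
      by_cases hb : b = p.2
      · simp [hb]
        omega
      · simp [hb, show p.2 ≠ b from fun h => hb h.symm]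

-- a fold inserting a constant value equal to the default leaves every getD at that value
lemma pvGetDConst {ν : Type} (c : ν) :
    ∀ (xs : List String) (d : PySem.Dict String ν),
      (∀ b, d.getD b c = c) → ∀ b, (xs.foldl (fun d x => d.insert x c) d).getD b c = c := by
  intro xs
  induction xs with
  | nil => intro d h b; exact h b
  | cons x xs ih =>
      intro d h b
      refine ih _ (fun b' => ?_) b
      rw [PySem.Dict.getD_insert]; split <;> simp [h]

-- Set.update by elements already present is the identity
lemma pvSetUpdateEq (s : PySem.Set String) :
    ∀ (xs : List String), (∀ x ∈ xs, x ∈ s) → PySem.Set.update s xs = s := by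
  intro xs
  induction xs generalizing s with
  | nil => intro _; rfl
  | cons x xs ih =>
      intro h
      have : PySem.Set.add s x = s := by
        simp [PySem.Set.add, PySem.Set.contains, h x (by simp)]
      simp only [PySem.Set.update, List.foldl_cons] at *
      rw [this]
      exact ih s (fun y hy => h y (by simp [hy]))

-- the scatter double loop is a single fold over the flattened reporter lists
lemma pvFlatten (g : String → List String) :
    ∀ (bs : List String) (d : PySem.Dict String Int),
      bs.foldl (fun d ban => (g ban).foldl (fun d i => d.modify i 0 (· + 1)) d) d =
        (bs.flatMap g).foldl (fun d i => d.modify i 0 (· + 1)) d := by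
  intro bs
  induction bs with
  | nil => intro d; rfl
  | cons b bs ih => intro d; simp only [List.foldl_cons, List.flatMap_cons, List.foldl_append, ih]

-- countP of a disjunction of disjoint predicates adds
lemma pvCountPOr {α : Type} (p q : α → Bool) (l : List α) (h : ∀ x, ¬(p x = true ∧ q x = true)) :
    l.countP (fun x => p x || q x) = l.countP p + l.countP q := by
  induction l with
  | nil => rfl
  | cons x l ih =>
      by_cases hp : p x = true <;> by_cases hq : q x = true
      · exact absurd ⟨hp, hq⟩ (h x)
      all_goals simp [hp, hq, ih]
      all_goals omega

-- partition: summing per-banned counts equals one countP with a membership test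
lemma pvPartition (i : String) (P : List (String × String)) :
    ∀ (bs : List String), bs.Nodup →
      (bs.map (fun b => P.countP (fun p => p.1 == i && p.2 == b))).sum =
        P.countP (fun p => p.1 == i && bs.contains p.2) := by
  intro bs
  induction bs with
  | nil => simp
  | cons b bs ih =>
      intro hnd
      rw [List.nodup_cons] at hnd
      have hdisj : ∀ p : String × String,
          ¬((p.1 == i && p.2 == b) = true ∧ (p.1 == i && bs.contains p.2) = true) := by
        intro p ⟨h1, h2⟩
        simp at h1 h2
        exact hnd.1 (h1.2 ▸ h2.2)
      have := pvCountPOr (fun p => p.1 == i && p.2 == b)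
        (fun p : String × String => p.1 == i && bs.contains p.2) P hdisj
      simp only [List.map_cons, List.sum_cons, ih hnd.2, ← this]
      congr 1
      funext p
      by_cases h1 : p.1 = i <;> by_cases h2 : p.2 = b <;> simp [h1, h2]

-- membership in B's banned set ↔ the target's report count reaches k
lemma pvBannedBContains (P : List (String × String)) (k : Int) (hk : 1 ≤ k) (t : String) :
    let cnt := P.foldl
      (fun (d : PySem.Dict String Int) (p : String × String) => d.modify p.2 0 (· + 1))
      PySem.Dict.empty
    (PySem.Set.ofList ((cnt.items).filterMap
        (fun q => if k ≤ q.2 then some q.1 else none))).contains t = true ↔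
      k ≤ ((P.map (·.2)).count t : Int) := by
  intro cnt
  have hcnt : ∀ s, cnt.getD s 0 = ((P.map (·.2)).count s : Int) := by
    intro s; rw [pvRcCount]; simp
  have hnd : cnt.keys.Nodup :=
    PySem.Dict.nodup_keys_foldl_modify_key P (·.2) 0 (fun _ _ v => v + 1) PySem.Dict.empty
      (by simp)
  have hkeys : cnt.keys = PySem.List.dedup (P.map (·.2)) := by
    rw [PySem.Dict.keys_foldl_modify_key P (·.2) 0 (fun _ _ v => v + 1) PySem.Dict.empty]
    rfl
  have hmemL : (PySem.Set.ofList ((cnt.items).filterMap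
      (fun q => if k ≤ q.2 then some q.1 else none))).contains t = true ↔
      t ∈ (cnt.items).filterMap (fun q => if k ≤ q.2 then some q.1 else none) := by
    simp [PySem.Set.contains]
  rw [hmemL, List.mem_filterMap]
  constructor
  · rintro ⟨q, hq, hqe⟩
    split_ifs at hqe with hkq
    · rw [Option.some_inj] at hqe
      subst hqe
      have hg : cnt.getD q.1 0 = q.2 := PySem.Dict.getD_of_mem_items cnt hq hnd 0
      rw [hcnt q.1] at hg
      omega
  · intro h
    have hpos : 0 < (P.map (·.2)).count t := by omega
    have htk : t ∈ cnt.keys := by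
      rw [hkeys]
      rw [show (t ∈ PySem.List.dedup (P.map (·.2))) ↔ t ∈ P.map (·.2) from
        PySem.List.mem_dedup _ _]
      exact List.count_pos_iff.mp hpos
    have hcont : cnt.contains t = true := (PySem.Dict.contains_iff_mem_keys cnt t).mpr htk
    rw [PySem.Dict.contains_eq_isSome_get?] at hcont
    obtain ⟨v, hv⟩ := Option.isSome_iff_exists.mp hcont
    refine ⟨(t, v), PySem.Dict.mem_items_of_get?_eq_some cnt hv, ?_⟩
    have : cnt.getD t 0 = v := by rw [PySem.Dict.getD_eq_get?_getD, hv]; rfl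
    rw [hcnt t] at this
    rw [if_pos (by omega)]

-- B computes, for each distinct id, the number of its reports whose target is banned
lemma pvBChar (id_list report : List String) (k : Int) (hk : 1 ≤ k) :
    solution_alt id_list report k =
      (PySem.List.dedup id_list).map (fun i =>
        (((pvPairs report).countP (fun p => p.1 == i &&
          decide (k ≤ (((pvPairs report).map (·.2)).count p.2 : Int)))) : Int)) := by
  unfold solution_alt
  dsimp only
  rw [pvFoldB_decomp]
  refine List.map_congr_left (fun i _ => ?_)
  rw [show ((PySem.Set.ofList report).filterMap pvParse?) = pvPairs report from rfl]
  congr 1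
  rw [PySem.Dict.getD_foldl_modify_append]
  rw [show (PySem.Dict.empty : PySem.Dict String (List String)).getD i [] = [] from rfl]
  rw [List.nil_append, List.countP_map, List.countP_filter]
  refine List.countP_congr (fun p _ => ?_)
  simp only [Function.comp_apply, Bool.and_comm]
  have := pvBannedBContains (pvPairs report) k hk p.2
  simp only at this
  rw [Bool.and_eq_true, Bool.and_eq_true, this]
  simp

-- A computes the same per-id counts through its banned list and scatter loop
lemma pvAChar (id_list report : List String) (k : Int) (hk : 1 ≤ k)
    (hsplit : ∀ r ∈ report, (PySem.Str.split₀ r).length = 2)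
    (hrep : ∀ p ∈ pvPairs report, p.1 ∈ id_list) :
    solution id_list report k =
      (PySem.List.dedup id_list).map (fun i =>
        (((pvPairs report).countP (fun p => p.1 == i &&
          decide (k ≤ (((pvPairs report).map (·.2)).count p.2 : Int)))) : Int)) := by
  unfold solution
  dsimp only
  rw [pvFoldA_decomp k _ _ (fun r hr => hsplit r ((PySem.Set.mem_ofList report r).mp hr))]
  dsimp only
  rw [show (PySem.Set.ofList report).filterMap pvParse? = pvPairs report from rfl]
  set P := pvPairs report with hPdef
  set rl0 := id_list.foldl (fun d id => d.insert id ([] : List String)) PySem.Dict.empty with hrl0def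
  set rc0 := id_list.foldl (fun d id => d.insert id (0 : Int)) PySem.Dict.empty with hrc0def
  set res0 := id_list.foldl (fun d id => d.insert id (0 : Int)) PySem.Dict.empty with hres0def
  have hrc0 : ∀ b, rc0.getD b 0 = 0 := pvGetDConst 0 id_list _ (fun _ => rfl)
  have hrl0 : ∀ b, rl0.getD b [] = [] := pvGetDConst ([] : List String) id_list _ (fun _ => rfl)
  have hres0 : ∀ b, res0.getD b 0 = 0 := pvGetDConst 0 id_list _ (fun _ => rfl)
  set rlF := P.foldl pvRlF rl0 with hrlFdef
  set bn := (P.foldl (pvPairF k) (rc0, [])).2 with hbndef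
  have hinvs := pvBannedInv k P rc0 []
    (fun b => by simp [hrc0 b]; omega) List.nodup_nil (fun b => by simp [hrc0 b])
  have hbn : ∀ b, b ∈ bn ↔ k ≤ ((P.map (·.2)).count b : Int) := by
    intro b
    rw [hbndef, hinvs.1 b, hrc0 b, zero_add]
  have hbnnd : bn.Nodup := hinvs.2
  have hrlF : ∀ b, rlF.getD b [] = (P.filter (fun p => p.2 == b)).map (·.1) := by
    intro b
    rw [hrlFdef, pvRlGetD, hrl0 b, List.nil_append]
  rw [pvFlatten (fun b => rlF.getD b []) bn res0]
  set flat := bn.flatMap (fun b => rlF.getD b []) with hflatdef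
  have hkeys0 : res0.keys = PySem.List.dedup id_list := by
    rw [hres0def, PySem.Dict.keys_foldl_insert id_list (fun _ _ => (0 : Int)) PySem.Dict.empty]
    rfl
  have hflat_sub : ∀ x ∈ flat, x ∈ res0.keys := by
    intro x hx
    rw [hkeys0, show (x ∈ PySem.List.dedup id_list) ↔ x ∈ id_list from PySem.List.mem_dedup _ _]
    obtain ⟨b, _, hxb⟩ := List.mem_flatMap.mp hx
    rw [hrlF b] at hxb
    obtain ⟨p, hp, hpx⟩ := List.mem_map.mp hxb
    exact hpx ▸ hrep p (List.mem_of_mem_filter hp)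
  set final := flat.foldl (fun d i => d.modify i 0 (· + 1)) res0 with hfinaldef
  have hkeysF : final.keys = res0.keys := by
    rw [hfinaldef, PySem.Dict.keys_foldl_modify flat 0 (fun _ _ v => v + 1) res0]
    exact pvSetUpdateEq _ _ hflat_sub
  have hndF : final.keys.Nodup := by
    rw [hkeysF, hkeys0]; exact PySem.List.nodup_dedup _ 
  rw [PySem.Dict.values_eq_map_keys final hndF 0, hkeysF, hkeys0]
  refine List.map_congr_left (fun i _ => ?_)
  rw [hfinaldef, PySem.Dict.getD_foldl_modify_add_one flat res0 i, hres0 i, zero_add]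
  congr 1
  rw [List.count_eq_countP, List.countP_flatMap]
  have hterm : ∀ b, (List.countP (fun x => x == i) ∘ (fun b => rlF.getD b [])) b =
      P.countP (fun p => p.1 == i && p.2 == b) := by
    intro b
    simp only [Function.comp_apply, hrlF b, List.countP_map, List.countP_filter]
  rw [List.map_congr_left (fun b _ => hterm b), pvPartition i P bn hbnnd]
  refine List.countP_congr (fun p _ => ?_)
  rw [Bool.and_eq_true, Bool.and_eq_true]
  have : bn.contains p.2 = true ↔ p.2 ∈ bn := by
    simp
  rw [this, hbn p.2]
  simp

-- ===== VERDICT (by name: the statement is the Claim_ definition above) =====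
theorem solution_spec : Claim_equal_solution := by
  intro id_list report k _ hpre
  obtain ⟨hk, hrep⟩ := hpre
  unfold Spec_solution
  have hsplit : ∀ r ∈ report, (PySem.Str.split₀ r).length = 2 := fun r hr => (hrep r hr).1
  have hmem1 : ∀ p ∈ pvPairs report, p.1 ∈ id_list := by
    intro p hp
    obtain ⟨r, hr, hpr⟩ := List.mem_filterMap.mp hp
    have hrrep : r ∈ report := (PySem.Set.mem_ofList report r).mp hr
    obtain ⟨a, b, hab⟩ := pvLen2 (hrep r hrrep).1
    have hpab : p = (a, b) := by
      simp [pvParse?, hab] at hpr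
      exact hpr.symm
    rw [hpab]
    exact (hrep r hrrep).2 a (by rw [hab]; simp)
  rw [pvAChar id_list report k hk hsplit hmem1, pvBChar id_list report k hk]
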